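-- pv_equiv track=rewrite | github.com/hagarbarakat/GeeksforGeeks-practice | Star elements.py | getStarAndSuperStar
-- ===== SOURCE A (Python) =====
-- def getStarAndSuperStar(arr, n):
--     stack = []
--     super_star = max(arr)
--     for i in reversed(range(n)):
--         if len(stack) == 0 or stack[-1] < arr[i]:
--             stack.append(arr[i])
--         elif super_star == arr[i]:
--             super_star = -1
--     stack.append(super_star)
--     return stack[::-1]
-- ===== SOURCE B (Python) =====
-- def getStarAndSuperStar(arr, n):
--     # B: closed-form superstar via a duplicate count on the prefix, plus a
--     # suffix-maximum list and one forward pass that emits leaders left-to-right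
--     # (no stack, no final reversal).
--     super_star = max(arr)
--     prefix = arr[:n] if n > 0 else []
--     if prefix.count(super_star) >= 2:
--         super_star = -1
--     sm = []                 # sm (reversed): max of the elements to the right
--     best = None
--     for x in reversed(prefix):
--         sm.append(best)
--         best = x if best is None or x > best else best
--     sm.reverse()
--     out = [super_star]
--     for x, b in zip(prefix, sm):
--         if b is None or x > b:
--             out.append(x)
--     return out
-- ===== Notes on version B (the rewrite author's own statement) =====
-- stated objective: alternative
-- what changed: Replaces A's right-to-left stack simulation with mutating superstar state by a closed-form duplicate count for the superstar plus a suffix-maximum list and a forward pass that emits leaders left-to-right, so no stack and no final reversal are needed.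
import Mathlib
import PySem

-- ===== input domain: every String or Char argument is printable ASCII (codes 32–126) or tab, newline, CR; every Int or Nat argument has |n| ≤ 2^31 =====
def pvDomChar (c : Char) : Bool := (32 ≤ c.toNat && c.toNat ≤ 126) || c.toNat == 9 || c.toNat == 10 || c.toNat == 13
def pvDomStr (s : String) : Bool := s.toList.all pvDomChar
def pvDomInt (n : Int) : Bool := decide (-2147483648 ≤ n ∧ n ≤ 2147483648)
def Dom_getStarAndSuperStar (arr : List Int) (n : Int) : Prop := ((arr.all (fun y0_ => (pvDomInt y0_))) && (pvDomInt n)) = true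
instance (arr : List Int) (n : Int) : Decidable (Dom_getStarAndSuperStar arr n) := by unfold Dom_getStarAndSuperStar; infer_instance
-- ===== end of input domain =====

-- B replaces A's right-to-left stack loop (with in-loop superstar mutation) by a
-- closed-form duplicate count for the superstar, a suffix-maximum list, and a
-- forward pass emitting leaders left-to-right (alternative decomposition, same cost).


-- ===== PORT A =====
def getStarAndSuperStar (arr : List Int) (n : Int) : List Int :=
  let superStar := (PySem.List.max? arr (fun y => y)).getD 0
  let st := ((PySem.List.pyRange 0 n 1).reverse).foldl
    (fun (s : List Int × Int) i =>
      if s.1 = [] ∨ PySem.List.pyGetD s.1 (-1) 0 < PySem.List.pyGetD arr i 0 then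
        (s.1 ++ [PySem.List.pyGetD arr i 0], s.2)
      else if s.2 = PySem.List.pyGetD arr i 0 then (s.1, -1)
      else s)
    ([], superStar)
  (st.1 ++ [st.2]).reverse

-- ===== PORT B =====
def getStarAndSuperStar_alt (arr : List Int) (n : Int) : List Int :=
  let superStar0 := (PySem.List.max? arr (fun y => y)).getD 0
  let pre := if 0 < n then PySem.List.slice arr none (some n) else []
  let superStar := if 2 ≤ PySem.List.count pre superStar0 then -1 else superStar0
  let p := pre.reverse.foldl
    (fun (s : List (Option Int) × Option Int) x =>
      (s.1 ++ [s.2], some (match s.2 with | none => x | some b => if b < x then x else b)))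
    ([], none)
  let sm := p.1.reverse
  (pre.zip sm).foldl
    (fun out xb =>
      if (match xb.2 with | none => true | some b => decide (b < xb.1)) then out ++ [xb.1]
      else out)
    [superStar]

-- ===== PRECONDITION & SPEC =====
-- Pre_ excludes exactly the inputs where Python A raises: empty arr (ValueError from
-- max) and n > len(arr) (IndexError from arr[i]).
def Pre_getStarAndSuperStar (arr : List Int) (n : Int) : Prop := arr ≠ [] ∧ n ≤ (arr.length : Int)
instance (arr : List Int) (n : Int) : Decidable (Pre_getStarAndSuperStar arr n) := by unfold Pre_getStarAndSuperStar; infer_instance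
def pvWitness_getStarAndSuperStar : List Int × Int := ([3, 1, 2], 3)

def Spec_getStarAndSuperStar (arr : List Int) (n : Int) (out : List Int) : Prop := out = getStarAndSuperStar_alt arr n
instance (arr : List Int) (n : Int) (out : List Int) : Decidable (Spec_getStarAndSuperStar arr n out) := by unfold Spec_getStarAndSuperStar; infer_instance

-- ===== CLAIM (what is proved, stated in full; the proofs are below) =====
def Claim_equal_getStarAndSuperStar : Prop := ∀ (arr : List Int) (n : Int), Dom_getStarAndSuperStar arr n → Pre_getStarAndSuperStar arr n → Spec_getStarAndSuperStar arr n (getStarAndSuperStar arr n)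

-- ===== LEMMAS AND PROOFS =====

-- running maximum (as B's loop computes it), as a structural recursion
def pvM : List Int → Option Int
  | [] => none
  | x :: t => some (match pvM t with | none => x | some b => if b < x then x else b)

-- A's stack, as a structural recursion
def pvStk : List Int → List Int
  | [] => []
  | x :: t =>
    if pvStk t = [] ∨ PySem.List.pyGetD (pvStk t) (-1) 0 < x then pvStk t ++ [x] else pvStk t

-- B's reversed suffix-max list
def pvSmRev : List Int → List (Option Int)
  | [] => []
  | _ :: t => pvSmRev t ++ [pvM t]

-- B's suffix-max list (left-to-right)
def pvSmL : List Int → List (Option Int)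
  | [] => []
  | _ :: t => pvM t :: pvSmL t

theorem pvM_cons (x : Int) (t : List Int) :
    pvM (x :: t) = some (match pvM t with | none => x | some b => if b < x then x else b) := rfl

theorem pvM_eq_none_iff (P : List Int) : pvM P = none ↔ P = [] := by
  cases P <;> simp [pvM]

theorem pvM_isMax (P : List Int) (m : Int) (h : pvM P = some m) : ∀ y ∈ P, y ≤ m := by
  induction P generalizing m with
  | nil => simp [pvM] at h
  | cons x t ih =>
    rw [pvM_cons] at h
    cases ht : pvM t with
    | none =>
      rw [ht] at h
      have htnil : t = [] := (pvM_eq_none_iff t).mp ht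
      subst htnil
      simp at h ⊢
      omega
    | some b =>
      rw [ht] at h
      simp only [Option.some.injEq] at h
      intro y hy
      rcases List.mem_cons.mp hy with rfl | hyt
      · by_cases hb : b < y <;> simp [hb] at h <;> omega
      · have := ih b ht y hyt
        by_cases hb : b < x <;> simp [hb] at h <;> omega

theorem pvM_mem (P : List Int) (m : Int) (h : pvM P = some m) : m ∈ P := by
  induction P generalizing m with
  | nil => simp [pvM] at h
  | cons x t ih =>
    rw [pvM_cons] at h
    cases ht : pvM t with
    | none =>
      rw [ht] at h
      simp only [Option.some.injEq] at h
      simp [h]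
    | some b =>
      rw [ht] at h
      simp only [Option.some.injEq] at h
      by_cases hb : b < x
      · simp [hb] at h; simp [h]
      · simp [hb] at h
        exact List.mem_cons_of_mem _ (h ▸ ih b ht)

theorem pvStk_cons (x : Int) (t : List Int) :
    pvStk (x :: t) =
      if pvStk t = [] ∨ PySem.List.pyGetD (pvStk t) (-1) 0 < x then pvStk t ++ [x]
      else pvStk t := rfl

theorem pvStk_inv (P : List Int) :
    (pvStk P = [] ↔ P = []) ∧ (∀ m, pvM P = some m → PySem.List.pyGetD (pvStk P) (-1) 0 = m) := by
  induction P with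
  | nil => simp [pvStk, pvM]
  | cons x t ih =>
    obtain ⟨ihnil, ihlast⟩ := ih
    by_cases hc : pvStk t = [] ∨ PySem.List.pyGetD (pvStk t) (-1) 0 < x
    · rw [pvStk_cons, if_pos hc]
      constructor
      · simp
      · intro m hm
        rw [PySem.List.pyGetD_neg_one_append_singleton]
        rw [pvM_cons] at hm
        cases ht : pvM t with
        | none => rw [ht] at hm; simp at hm; omega
        | some b =>
          rw [ht] at hm
          simp only [Option.some.injEq] at hm
          rcases hc with h0 | hlt
          · have : t = [] := ihnil.mp h0
            subst this
            simp [pvM] at ht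
          · rw [ihlast b ht] at hlt
            simp [hlt] at hm; omega
    · rw [pvStk_cons, if_neg hc]
      rw [not_or] at hc
      obtain ⟨h0, hge⟩ := hc
      rw [not_lt] at hge
      have htne : t ≠ [] := fun h => h0 (ihnil.mpr h)
      obtain ⟨b, hb⟩ : ∃ b, pvM t = some b := by
        cases ht : pvM t with
        | none => exact absurd ((pvM_eq_none_iff t).mp ht) htne
        | some b => exact ⟨b, rfl⟩
      have hlast := ihlast b hb
      have hxb : x ≤ b := by rw [hlast] at hge; omega
      refine ⟨⟨fun h => absurd h h0, fun h => absurd h (by simp)⟩, ?_⟩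
      intro m hm
      rw [pvM_cons, hb] at hm
      simp only [Option.some.injEq] at hm
      have hmb : m = b := by by_cases h : b < x <;> simp [h] at hm <;> omega
      rw [hlast, hmb]

theorem pvA_fold (s0 : Int) (P : List Int) (hbound : ∀ x ∈ P, x ≤ s0) :
    P.foldr
      (fun a (s : List Int × Int) =>
        if s.1 = [] ∨ PySem.List.pyGetD s.1 (-1) 0 < a then (s.1 ++ [a], s.2)
        else if s.2 = a then (s.1, -1) else s)
      ([], s0)
    = (pvStk P, if 2 ≤ P.count s0 then -1 else s0) := by
  induction P with
  | nil => simp [pvStk]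
  | cons x t ih =>
    have hbt : ∀ y ∈ t, y ≤ s0 := fun y hy => hbound y (List.mem_cons_of_mem _ hy)
    have hx0 : x ≤ s0 := hbound x List.mem_cons_self
    simp only [List.foldr_cons, ih hbt]
    rw [pvStk_cons]
    by_cases hc : pvStk t = [] ∨ PySem.List.pyGetD (pvStk t) (-1) 0 < x
    · -- pushed
      rw [if_pos hc, if_pos hc]
      have hcnt : (2 ≤ t.count s0 ↔ 2 ≤ (x :: t).count s0) := by
        by_cases hx : x = s0
        · subst hx
          have hnot : x ∉ t := by
            intro hmem
            rcases hc with h0 | hlt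
            · have ht0 : t = [] := (pvStk_inv t).1.mp h0
              rw [ht0] at hmem
              exact (List.not_mem_nil hmem)
            · obtain ⟨b, hb⟩ : ∃ b, pvM t = some b := by
                cases ht : pvM t with
                | none =>
                  have : t = [] := (pvM_eq_none_iff t).mp ht
                  rw [this] at hmem
                  exact absurd hmem (List.not_mem_nil)
                | some b => exact ⟨b, rfl⟩
              have hle := pvM_isMax t b hb x hmem
              rw [(pvStk_inv t).2 b hb] at hlt
              omega
          have hz : t.count x = 0 := List.count_eq_zero.mpr hnot
          simp [hz]
        · simp [hx]
      by_cases h2 : 2 ≤ t.count s0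
      · rw [if_pos h2, if_pos (hcnt.mp h2)]
      · rw [if_neg h2, if_neg (fun hh => h2 (hcnt.mpr hh))]
    · -- not pushed
      rw [if_neg hc, if_neg hc]
      rw [not_or, not_lt] at hc
      obtain ⟨h0, hge⟩ := hc
      have htne : t ≠ [] := fun h => h0 ((pvStk_inv t).1.mpr h)
      obtain ⟨b, hb⟩ : ∃ b, pvM t = some b := by
        cases ht : pvM t with
        | none => exact absurd ((pvM_eq_none_iff t).mp ht) htne
        | some b => exact ⟨b, rfl⟩
      have hlast := (pvStk_inv t).2 b hb
      have hxb : x ≤ b := by rw [hlast] at hge; omega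
      by_cases h2 : 2 ≤ t.count s0
      · have hc2 : 2 ≤ (x :: t).count s0 := by
          simp only [List.count_cons]
          omega
        rw [if_pos h2, if_pos hc2]
        split_ifs <;> rfl
      · rw [if_neg h2]
        by_cases hxs : s0 = x
        · have hbmem := pvM_mem t b hb
          have hbs : b = s0 := by
            have := hbt b hbmem
            omega
          have hmem : s0 ∈ t := hbs ▸ hbmem
          have h1 : 1 ≤ t.count s0 := List.one_le_count_iff.mpr hmem
          have hc2 : 2 ≤ (x :: t).count s0 := by
            simp only [List.count_cons, ← hxs]
            simp
            omega
          rw [if_pos hxs, if_pos hc2]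
        · rw [if_neg hxs]
          have hceq : (x :: t).count s0 = t.count s0 := by
            have hxs' : x ≠ s0 := fun hh => hxs hh.symm
            simp [hxs']
          rw [hceq, if_neg h2]

theorem pvB_fold (P : List Int) :
    P.foldr
      (fun x (s : List (Option Int) × Option Int) =>
        (s.1 ++ [s.2], some (match s.2 with | none => x | some b => if b < x then x else b)))
      ([], none)
    = (pvSmRev P, pvM P) := by
  induction P with
  | nil => simp [pvSmRev, pvM]
  | cons x t ih => simp [List.foldr_cons, ih, pvSmRev, pvM]

theorem pvSmRev_reverse (P : List Int) : (pvSmRev P).reverse = pvSmL P := by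
  induction P with
  | nil => simp [pvSmRev, pvSmL]
  | cons x t ih => simp [pvSmRev, pvSmL, ih]

theorem pvZip_fold (P : List Int) : ∀ (init : List Int),
    (P.zip (pvSmL P)).foldl
      (fun out (xb : Int × Option Int) =>
        if (match xb.2 with | none => true | some b => decide (b < xb.1)) then out ++ [xb.1]
        else out)
      init
    = init ++ (pvStk P).reverse := by
  induction P with
  | nil => simp [pvSmL, pvStk]
  | cons x t ih =>
    intro init
    have hcond : (match pvM t with | none => true | some b => decide (b < x))
        = decide (pvStk t = [] ∨ PySem.List.pyGetD (pvStk t) (-1) 0 < x) := by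
      cases ht : pvM t with
      | none =>
        have : t = [] := (pvM_eq_none_iff t).mp ht
        simp [this, pvStk]
      | some b =>
        have htne : t ≠ [] := by
          intro h; rw [h] at ht; simp [pvM] at ht
        have hne : pvStk t ≠ [] := fun h => htne ((pvStk_inv t).1.mp h)
        rw [(pvStk_inv t).2 b ht]
        simp [hne]
    simp only [pvSmL, List.zip_cons_cons, List.foldl_cons, hcond]
    by_cases hc : pvStk t = [] ∨ PySem.List.pyGetD (pvStk t) (-1) 0 < x
    · simp only [hc, decide_true, if_true, ih]
      simp [pvStk, hc]
    · simp only [hc, decide_false, ih]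
      simp [pvStk, hc]

theorem pvPrefix_map (arr : List Int) (n : Int) (h0 : 0 ≤ n) (hlen : n ≤ (arr.length : Int)) :
    (PySem.List.pyRange 0 n 1).map (fun i => PySem.List.pyGetD arr i 0) = arr.take n.toNat := by
  rw [PySem.List.pyRange_one]
  rw [List.map_map]
  have : (n - 0).toNat = n.toNat := by omega
  rw [this]
  apply List.ext_getElem
  · simp; omega
  · intro i h1 h2
    simp only [List.getElem_map, List.getElem_range, Function.comp_apply, List.getElem_take]
    have : ((0 : Int) + (i : Int)) = ((i : Nat) : Int) := by omega
    rw [this, PySem.List.pyGetD_natCast]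
    have hi : i < arr.length := by simp at h1; omega
    simp [List.getD, hi]

-- ===== VERDICT (by name: the statement is the Claim_ definition above) =====
theorem getStarAndSuperStar_spec : Claim_equal_getStarAndSuperStar := by
  intro arr n _ hpre
  obtain ⟨hne, hlen⟩ := hpre
  unfold Spec_getStarAndSuperStar getStarAndSuperStar getStarAndSuperStar_alt
  obtain ⟨m, hm⟩ : ∃ m, PySem.List.max? arr (fun y => y) = some m := by
    cases h : PySem.List.max? arr (fun y => y) with
    | none => exact absurd ((PySem.List.max?_eq_none_iff arr (fun y => y)).mp h) hne
    | some m => exact ⟨m, rfl⟩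
  simp only [hm, Option.getD_some]
  by_cases hn : 0 < n
  · have hP := pvPrefix_map arr n (by omega) hlen
    have hslice : PySem.List.slice arr none (some n) = arr.take n.toNat :=
      PySem.List.slice_to arr (by omega)
    set P := arr.take n.toNat with hPdef
    have hbound : ∀ x ∈ P, x ≤ m := fun x hx =>
      PySem.List.max?_isMax hm x (List.mem_of_mem_take hx)
    -- A side: fold over reversed range = foldr over P
    rw [List.foldl_reverse]
    have hfoldrA : (PySem.List.pyRange 0 n 1).foldr
        (fun i (s : List Int × Int) =>
          if s.1 = [] ∨ PySem.List.pyGetD s.1 (-1) 0 < PySem.List.pyGetD arr i 0 then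
            (s.1 ++ [PySem.List.pyGetD arr i 0], s.2)
          else if s.2 = PySem.List.pyGetD arr i 0 then (s.1, -1) else s)
        ([], m)
        = P.foldr
          (fun a (s : List Int × Int) =>
            if s.1 = [] ∨ PySem.List.pyGetD s.1 (-1) 0 < a then (s.1 ++ [a], s.2)
            else if s.2 = a then (s.1, -1) else s)
          ([], m) := by
      rw [← hP, List.foldr_map]
    rw [hfoldrA, pvA_fold m P hbound]
    -- B side
    rw [if_pos hn, hslice, List.foldl_reverse]
    have hfoldrB : P.foldr
        (fun x (s : List (Option Int) × Option Int) =>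
          (s.1 ++ [s.2], some (match s.2 with | none => x | some b => if b < x then x else b)))
        ([], none)
        = (pvSmRev P, pvM P) := pvB_fold P
    rw [hfoldrB]
    simp only [pvSmRev_reverse]
    rw [pvZip_fold P]
    simp [PySem.List.count_eq]
  · -- n ≤ 0: empty range and empty prefix
    rw [PySem.List.pyRange_one_eq_nil (by omega)]
    simp [hn, PySem.List.count]
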